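-- pv_equiv track=rewrite | github.com/TheEyeboy/functions | functions/my_functions.py | sorted_string_with_index
-- ===== SOURCE A (Python) =====
-- def sorted_string_with_index(string):
--
--     #Initialize a variable for even and odd character
--     even_character = []
--     odd_character = []
--
--     #Iterate over the string
--     for character in range(len(string)):
--         #Check if the index value is divisible by 2
--         if character % 2 == 0:
--             even_character.append((character, string[character]))
--         else :
--             odd_character.append((character, string[character]))
--
--     return even_character, odd_character
-- ===== SOURCE B (Python) =====
-- def sorted_string_with_index(string):
--     pairs = list(enumerate(string))
--     return pairs[0::2], pairs[1::2]
-- ===== Notes on version B (the rewrite author's own statement) =====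
-- stated objective: idiomatic
-- what changed: Builds the full (index, char) table once with enumerate and extracts the two halves by stride slicing pairs[0::2] / pairs[1::2], instead of a per-index loop with a parity branch and two appends.
import Mathlib
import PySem

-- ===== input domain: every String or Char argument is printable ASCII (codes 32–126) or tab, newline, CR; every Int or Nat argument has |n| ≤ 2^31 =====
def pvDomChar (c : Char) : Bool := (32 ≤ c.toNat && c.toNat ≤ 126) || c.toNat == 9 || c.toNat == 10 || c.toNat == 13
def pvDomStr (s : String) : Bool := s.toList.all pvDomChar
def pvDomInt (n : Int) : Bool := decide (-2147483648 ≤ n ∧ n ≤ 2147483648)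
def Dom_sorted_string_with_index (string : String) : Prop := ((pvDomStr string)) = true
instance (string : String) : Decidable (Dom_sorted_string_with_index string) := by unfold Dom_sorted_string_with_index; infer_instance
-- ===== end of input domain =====

-- B replaces A's per-index parity loop by one enumerate pass plus two stride slices (idiomatic; same O(n) cost; return value only).

-- ===== PORT A =====
-- literal transliteration of A: index loop over range(len(string)), parity branch, two append accumulators
def sorted_string_with_index (string : String) : (List (Int × String)) × (List (Int × String)) :=
  (PySem.List.pyRange 0 (PySem.Str.len string) 1).foldl
    (fun (acc : (List (Int × String)) × (List (Int × String))) character =>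
      if PySem.Int.mod character 2 = 0 then
        (acc.1 ++ [(character, ((PySem.Str.pyGet? string character).map (fun c => String.mk [c])).getD "")], acc.2)
      else
        (acc.1, acc.2 ++ [(character, ((PySem.Str.pyGet? string character).map (fun c => String.mk [c])).getD "")]))
    ([], [])

-- ===== PORT B =====
-- literal transliteration of B: pairs = list(enumerate(string)); return pairs[0::2], pairs[1::2]
def sorted_string_with_index_alt (string : String) : (List (Int × String)) × (List (Int × String)) :=
  let pairs : List (Int × String) :=
    PySem.List.enumerate (string.toList.map (fun c => String.mk [c])) 0
  ((PySem.List.slice? pairs (some 0) none 2).getD [],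
   (PySem.List.slice? pairs (some 1) none 2).getD [])

-- ===== PRECONDITION & SPEC =====
def Spec_sorted_string_with_index (string : String) (out : (List (Int × String)) × (List (Int × String))) : Prop := out = sorted_string_with_index_alt string
instance (string : String) (out : (List (Int × String)) × (List (Int × String))) : Decidable (Spec_sorted_string_with_index string out) := by unfold Spec_sorted_string_with_index; infer_instance

-- ===== CLAIM (what is proved, stated in full; the proofs are below) =====
def Claim_equal_sorted_string_with_index : Prop := ∀ (string : String), Dom_sorted_string_with_index string → Spec_sorted_string_with_index string (sorted_string_with_index string)

-- ===== LEMMAS AND PROOFS =====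

-- elements at even (b = true) resp. odd (b = false) positions
def pvPick {α : Type} (b : Bool) : List α → List α
  | [] => []
  | x :: t => if b then x :: pvPick (!b) t else pvPick (!b) t

theorem pvPick_nil {α : Type} (b : Bool) : pvPick b ([] : List α) = [] := rfl

theorem pvPick_cons {α : Type} (b : Bool) (x : α) (t : List α) :
    pvPick b (x :: t) = if b then x :: pvPick (!b) t else pvPick (!b) t := rfl

theorem pvPick_eq_both {α : Type} (ys : List α) :
    pvPick true ys = (List.range ((ys.length + 1) / 2)).filterMap (fun k => ys[2 * k]?) ∧
    pvPick false ys = (List.range (ys.length / 2)).filterMap (fun k => ys[2 * k + 1]?) := by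
  induction ys with
  | nil => simp [pvPick]
  | cons a t ih =>
    have hodd : (fun k => (a :: t)[2 * k + 1]?) = (fun k => t[2 * k]?) := by
      funext k; simp
    constructor
    · rw [pvPick_cons]
      simp only [if_pos rfl, Bool.not_true, List.length_cons]
      rw [show (t.length + 1 + 1) / 2 = t.length / 2 + 1 from by omega,
        List.range_succ_eq_map, List.filterMap_cons, List.filterMap_map]
      have h0 : (a :: t)[2 * 0]? = some a := by simp
      have h1 : ((fun k => (a :: t)[2 * k]?) ∘ Nat.succ) = (fun k => t[2 * k + 1]?) := by
        funext k
        show (a :: t)[2 * (k + 1)]? = t[2 * k + 1]?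
        rw [show 2 * (k + 1) = (2 * k + 1) + 1 from by omega]
        simp
      rw [h1, ih.2]
      simp
    · rw [pvPick_cons]
      simp only [if_neg (by simp : ¬ (false = true)), Bool.not_false, List.length_cons]
      rw [show (t.length + 1) / 2 = (t.length + 1) / 2 from rfl, hodd]
      exact ih.1

theorem pvSlice_zero {α : Type} (ys : List α) :
    PySem.List.slice? ys (some 0) none 2 = some (pvPick true ys) := by
  rw [(pvPick_eq_both ys).1]
  simp only [PySem.List.slice?, PySem.List.sliceIndices]
  norm_num
  have hC : (if 0 < ys.length then (((ys.length : Int) + 2 - 1) / 2).toNat else 0)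
      = (ys.length + 1) / 2 := by split <;> omega
  have hidx : (fun k : Nat => ys[((2 : Int) * (k : Int)).toNat]?) = (fun k : Nat => ys[2 * k]?) := by
    funext k
    rw [show ((2 : Int) * (k : Int)).toNat = 2 * k from by omega]
  rw [hC, hidx]

theorem pvSlice_one {α : Type} (ys : List α) :
    PySem.List.slice? ys (some 1) none 2 = some (pvPick false ys) := by
  rw [(pvPick_eq_both ys).2]
  simp only [PySem.List.slice?, PySem.List.sliceIndices]
  norm_num
  by_cases h0 : ys.length = 0
  · simp [h0]
  · have h1 : min (1 : Int) (ys.length : Int) = 1 := by omega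
    rw [h1]
    have hC : (if 1 < ys.length then (((ys.length : Int) - 1 + 2 - 1) / 2).toNat else 0)
        = ys.length / 2 := by split <;> omega
    have hidx : (fun k : Nat => ys[((1 : Int) + (2 : Int) * (k : Int)).toNat]?) = (fun k : Nat => ys[2 * k + 1]?) := by
      funext k
      rw [show ((1 : Int) + (2 : Int) * (k : Int)).toNat = 2 * k + 1 from by omega]
    rw [hC, hidx]

theorem pvEnumerate_snoc {α : Type} (ys : List α) (z : α) : ∀ (s : Int),
    PySem.List.enumerate (ys ++ [z]) s = PySem.List.enumerate ys s ++ [(s + ys.length, z)] := by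
  induction ys with
  | nil => intro s; simp [PySem.List.enumerate_cons, PySem.List.enumerate_nil]
  | cons y t ih =>
    intro s
    rw [List.cons_append, PySem.List.enumerate_cons, ih (s + 1),
      PySem.List.enumerate_cons, List.cons_append,
      show s + 1 + ((t.length : Nat) : Int) = s + (((y :: t).length : Nat) : Int) from by simp only [List.length_cons]; push_cast; ring]

theorem pvPick_snoc {α : Type} (ys : List α) (p : α) : ∀ (b : Bool),
    pvPick b (ys ++ [p]) =
      pvPick b ys ++ (if b = decide (ys.length % 2 = 0) then [p] else []) := by
  induction ys with
  | nil => intro b; cases b <;> simp [pvPick]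
  | cons y t ih =>
    intro b
    rw [List.cons_append, pvPick_cons, pvPick_cons, ih (!b)]
    have hpar : ((!b) = decide (t.length % 2 = 0)) ↔ (b = decide ((y :: t).length % 2 = 0)) := by
      cases b <;> by_cases h : t.length % 2 = 0 <;>
        simp [h, List.length_cons] <;> omega
    by_cases hb : b = true
    · subst hb
      simp only [if_pos rfl]
      by_cases h : (!true) = decide (t.length % 2 = 0)
      · rw [if_pos h, if_pos (hpar.mp h)]; simp
      · rw [if_neg h, if_neg (fun hc => h (hpar.mpr hc))]; simp
    · have hb' : b = false := by cases b; rfl; exact absurd rfl hb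
      subst hb'
      simp only [if_neg (by simp : ¬ (false = true))]
      by_cases h : (!false) = decide (t.length % 2 = 0)
      · rw [if_pos h, if_pos (hpar.mp h)]
      · rw [if_neg h, if_neg (fun hc => h (hpar.mpr hc))]

theorem pvFoldA (string : String) : ∀ (m : Nat), m ≤ string.toList.length →
    (PySem.List.pyRange 0 (m : Int) 1).foldl
      (fun (acc : (List (Int × String)) × (List (Int × String))) character =>
        if PySem.Int.mod character 2 = 0 then
          (acc.1 ++ [(character, ((PySem.Str.pyGet? string character).map (fun c => String.mk [c])).getD "")], acc.2)
        else
          (acc.1, acc.2 ++ [(character, ((PySem.Str.pyGet? string character).map (fun c => String.mk [c])).getD "")]))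
      ([], [])
    = (pvPick true (PySem.List.enumerate ((string.toList.take m).map (fun c => String.mk [c])) 0),
       pvPick false (PySem.List.enumerate ((string.toList.take m).map (fun c => String.mk [c])) 0)) := by
  intro m
  induction m with
  | zero =>
    intro _
    simp [PySem.List.pyRange_one_eq_nil, PySem.List.enumerate_nil, pvPick_nil]
  | succ m ih =>
    intro hm
    have hm' : m < string.toList.length := by omega
    have hcast : ((m + 1 : Nat) : Int) = (m : Int) + 1 := by push_cast; ring
    rw [hcast, PySem.List.pyRange_one_succ_right (by positivity), List.foldl_append,
      ih (by omega), List.foldl_cons, List.foldl_nil]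
    -- the appended element
    have hget : PySem.Str.pyGet? string (m : Int) = some (string.toList[m]) := by
      rw [PySem.Str.pyGet?_natCast]
      exact List.getElem?_eq_getElem hm'
    have htake : string.toList.take (m + 1) = string.toList.take m ++ [string.toList[m]] := by
      rw [List.take_succ, List.getElem?_eq_getElem hm']
      rfl
    have hlen : ((string.toList.take m).map (fun c => String.mk [c])).length = m := by
      simp only [List.length_map, List.length_take]
      omega
    have hlenE : (PySem.List.enumerate ((string.toList.take m).map (fun c => String.mk [c])) 0).length = m := by
      rw [PySem.List.length_enumerate, hlen]
    rw [htake, List.map_append, List.map_cons, List.map_nil,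
      pvEnumerate_snoc, hlen]
    have hmod : PySem.Int.mod (m : Int) 2 = ((m % 2 : Nat) : Int) := by
      exact_mod_cast PySem.Int.mod_natCast m 2
    by_cases hpar : m % 2 = 0
    · rw [if_pos (by rw [hmod, hpar]; rfl)]
      rw [pvPick_snoc, pvPick_snoc, hlenE,
        if_pos (by simp [hpar]), if_neg (by simp [hpar])]
      simp [List.getElem?_eq_getElem hm']
    · rw [if_neg (by rw [hmod]; omega)]
      rw [pvPick_snoc, pvPick_snoc, hlenE,
        if_neg (by simp [hpar]), if_pos (by simp [hpar])]
      simp [List.getElem?_eq_getElem hm']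

-- ===== VERDICT (by name: the statement is the Claim_ definition above) =====
theorem sorted_string_with_index_spec : Claim_equal_sorted_string_with_index := by
  intro string _
  unfold Spec_sorted_string_with_index sorted_string_with_index sorted_string_with_index_alt
  rw [PySem.Str.len_eq, pvFoldA string string.toList.length le_rfl, List.take_length]
  simp [pvSlice_zero, pvSlice_one]
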